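-- pv_equiv track=rewrite | github.com/sanglim00/algorithm-solved | 프로그래머스/1/135808. 과일 장수/과일 장수.py | solution
-- ===== SOURCE A (Python) =====
-- def solution(k, m, score):
--     answer = 0
--
--     score.sort(reverse=True)
--     score = score[0:len(score)-len(score)%m]
--
--     i = 0
--     while i+m <= len(score):
--         minNum = min(score[i:i+m])
--         answer+=minNum*m
--         i +=m
--
--
--
--
--
--
--     return answer
-- ===== SOURCE B (Python) =====
-- def solution(k, m, score):
--     # Count each grade once, then walk the distinct grades from highest to
--     # lowest, tracking how many apples precede the current run in descending
--     # order; the number of box-closing positions (index = m-1 mod m, below the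
--     # full-boxes cutoff) that fall inside a run is computed arithmetically.
--     freq = {}
--     for v in score:
--         freq[v] = freq.get(v, 0) + 1
--     full = len(score) - len(score) % m
--     pos = 0
--     total = 0
--     for v in sorted(freq, reverse=True):
--         c = freq[v]
--         lo = min(pos, full)
--         hi = min(pos + c, full)
--         total += (hi // m - lo // m) * v
--         pos += c
--     return total * m
-- ===== Notes on version B (the rewrite author's own statement) =====
-- stated objective: alternative
-- what changed: Replaces sort-then-scan-groups (A sorts the whole list descending and takes min() of each m-slice) by a frequency-map algorithm: B counts each grade once in a dict, walks the distinct grades in descending order keeping a running position, and counts the box-closing positions falling inside each grade's run arithmetically (hi//m - lo//m), so the full list is never sorted and no group is ever scanned; trade-off: more bookkeeping per distinct value. A sorts score in place; B does not mutate it (equivalence is about the return value).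
import Mathlib
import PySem

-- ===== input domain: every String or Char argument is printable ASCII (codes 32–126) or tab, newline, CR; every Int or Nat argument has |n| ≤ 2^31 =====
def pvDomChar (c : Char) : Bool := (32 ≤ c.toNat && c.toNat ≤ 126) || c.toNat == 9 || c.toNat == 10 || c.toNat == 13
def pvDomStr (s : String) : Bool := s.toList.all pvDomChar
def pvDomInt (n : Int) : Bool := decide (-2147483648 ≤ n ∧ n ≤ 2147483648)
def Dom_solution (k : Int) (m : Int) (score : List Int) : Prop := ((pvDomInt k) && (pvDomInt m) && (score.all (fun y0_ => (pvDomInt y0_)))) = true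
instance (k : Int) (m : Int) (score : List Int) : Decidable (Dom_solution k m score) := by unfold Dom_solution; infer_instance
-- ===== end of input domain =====

-- B replaces A's sort + per-group min() scan by a frequency dict walked over its distinct grades
-- in descending order with arithmetic counting of box-closing positions (objective: alternative).
-- A sorts `score` in place, B does not mutate it: the equivalence proved here is about the return value.

-- ===== PORT A =====
-- the while loop; fuel (length + 1) is only a totality guard — inside Pre_ (1 ≤ m) the loop
-- performs at most score2.length iterations.  min() on an empty slice raises in Python; inside
-- Pre_ the slice is never empty, the `.getD 0` default is unreachable there.
def solutionLoopA (score : List Int) (m : Int) : Nat → Int → Int → Int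
  | 0, _, answer => answer
  | fuel + 1, i, answer =>
    if i + m ≤ (score.length : Int) then
      solutionLoopA score m fuel (i + m)
        (answer + ((PySem.List.min? (PySem.List.slice score (some i) (some (i + m))) (fun x => x)).getD 0) * m)
    else answer

def solution (k : Int) (m : Int) (score : List Int) : Int :=
  let answer : Int := 0
  let sorted := PySem.List.sorted score (fun x => x) true
  let score2 := PySem.List.slice sorted (some 0) (some ((sorted.length : Int) - PySem.Int.mod (sorted.length : Int) m))
  solutionLoopA score2 m (score2.length + 1) 0 answer

-- ===== PORT B =====
-- freq = {v: count}; then fold over sorted(freq, reverse=True) carrying (pos, total).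
def solution_alt (k : Int) (m : Int) (score : List Int) : Int :=
  let freq := score.foldl (fun d v => d.insert v (d.getD v 0 + 1)) (PySem.Dict.empty : PySem.Dict Int Int)
  let full := (score.length : Int) - PySem.Int.mod (score.length : Int) m
  let res := (PySem.List.sorted freq.keys (fun x => x) true).foldl
    (fun (p : Int × Int) v =>
      let c := freq.getD v 0
      let lo := min p.1 full
      let hi := min (p.1 + c) full
      (p.1 + c, p.2 + (PySem.Int.floordiv hi m - PySem.Int.floordiv lo m) * v))
    (0, 0)
  res.2 * m

-- ===== PRECONDITION & SPEC =====
-- Pre_ excludes only m ≤ 0, where Python A never returns (ZeroDivisionError for m = 0 from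
-- len(score) % m; ValueError from min() of an empty slice, or divergence, for m < 0).
def Pre_solution (k : Int) (m : Int) (score : List Int) : Prop := 1 ≤ m
instance (k : Int) (m : Int) (score : List Int) : Decidable (Pre_solution k m score) := by unfold Pre_solution; infer_instance

def pvWitness_solution : Int × Int × List Int := (0, 3, [4, 1, 2, 5, 2, 1, 1])

def Spec_solution (k : Int) (m : Int) (score : List Int) (out : Int) : Prop := out = solution_alt k m score
instance (k : Int) (m : Int) (score : List Int) (out : Int) : Decidable (Spec_solution k m score out) := by unfold Spec_solution; infer_instance

-- ===== CLAIM (what is proved, stated in full; the proofs are below) =====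
def Claim_equal_solution : Prop := ∀ (k : Int) (m : Int) (score : List Int), Dom_solution k m score → Pre_solution k m score → Spec_solution k m score (solution k m score)


-- ===== LEMMAS AND PROOFS =====

-- the common reference value: sum of s[j] over the "box-closing" offsets j,
-- i.e. (pos + j + 1) % M = 0 with pos + j below the cutoff `full`
def selSum (M full pos : Nat) (s : List Int) : Int :=
  (((List.range s.length).filter (fun j => (pos + j + 1) % M == 0 && pos + j < full)).map
    (fun j => s.getD j 0)).sum

theorem selSum_append (M full pos : Nat) (a b : List Int) :
    selSum M full pos (a ++ b) = selSum M full pos a + selSum M full (pos + a.length) b := by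
  unfold selSum
  rw [List.length_append, List.range_add, List.filter_append, List.map_append, List.sum_append]
  congr 1
  · apply congrArg
    apply List.map_congr_left
    intro j hj
    have hj' : j < a.length := List.mem_range.mp (List.mem_filter.mp hj).1
    rw [List.getD_eq_getElem?_getD, List.getD_eq_getElem?_getD, List.getElem?_append_left hj']
  · rw [List.filter_map, List.map_map]
    apply congrArg
    have hpred : ((fun j => (pos + j + 1) % M == 0 && decide (pos + j < full)) ∘ (fun x => a.length + x))
        = (fun j => (pos + a.length + j + 1) % M == 0 && decide (pos + a.length + j < full)) := by
      funext x
      simp only [Function.comp_apply]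
      have h1 : pos + (a.length + x) = pos + a.length + x := by omega
      rw [h1]
    rw [hpred]
    apply List.map_congr_left
    intro j _
    simp only [Function.comp_apply]
    rw [List.getD_eq_getElem?_getD, List.getD_eq_getElem?_getD, List.getElem?_append_right (by omega)]
    congr 2
    omega

theorem selSum_singleton (M full pos : Nat) (v : Int) :
    selSum M full pos [v] = if (pos + 1) % M = 0 ∧ pos < full then v else 0 := by
  unfold selSum
  have hl : ([v] : List Int).length = 1 := rfl
  rw [hl, List.range_one]
  by_cases h : (pos + 1) % M = 0 ∧ pos < full
  · rw [if_pos h]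
    simp [List.filter, h.1, h.2]
  · rw [if_neg h]
    have : ((pos + 1) % M == 0 && decide (pos < full)) = false := by
      rcases Decidable.not_and_iff_not_or_not.mp h with h1 | h1 <;> simp [h1]
    simp [List.filter, this]

theorem selSum_replicate (M full pos : Nat) (c : Nat) (v : Int) :
    selSum M full pos (List.replicate c v)
      = v * ((min (pos + c) full / M : Nat) - (min pos full / M : Nat) : Int) := by
  induction c with
  | zero => simp [selSum]
  | succ c ih =>
    rw [List.replicate_succ', selSum_append, ih, List.length_replicate, selSum_singleton]
    have hpc : pos + (c + 1) = pos + c + 1 := by omega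
    rw [hpc]
    have hsd := @Nat.succ_div (pos + c) M
    by_cases h : (pos + c + 1) % M = 0 ∧ pos + c < full
    · rw [if_pos h]
      have hdv : M ∣ pos + c + 1 := Nat.dvd_of_mod_eq_zero h.1
      have h1 : pos + c + 1 ≤ full := h.2
      have hmin1 : min (pos + c + 1) full = pos + c + 1 := by omega
      have hmin2 : min (pos + c) full = pos + c := by omega
      have hstep : min (pos + c + 1) full / M = min (pos + c) full / M + 1 := by
        rw [hmin1, hmin2, hsd, if_pos hdv]
      rw [hstep]
      push_cast
      ring
    · rw [if_neg h]
      have hstep : min (pos + c + 1) full / M = min (pos + c) full / M := by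
        by_cases h2 : pos + c < full
        · have hnd : ¬ M ∣ pos + c + 1 := fun hd =>
            h ⟨Nat.mod_eq_zero_of_dvd hd, h2⟩
          have hmin2 : min (pos + c) full = pos + c := by omega
          rcases Nat.lt_or_ge (pos + c + 1) full with h3 | h3
          · have hmin1 : min (pos + c + 1) full = pos + c + 1 := by omega
            rw [hmin1, hmin2, hsd, if_neg hnd]
            omega
          · have h4 : pos + c + 1 = full := by omega
            have hmin1 : min (pos + c + 1) full = full := by omega
            rw [hmin1, hmin2, ← h4, hsd, if_neg hnd]
            omega
        · have hmin1 : min (pos + c + 1) full = full := by omega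
          have hmin2 : min (pos + c) full = full := by omega
          rw [hmin1, hmin2]
      rw [hstep]
      ring

theorem selSum_full_zero (M pos : Nat) (s : List Int) : selSum M 0 pos s = 0 := by
  unfold selSum
  have : (List.range s.length).filter (fun j => (pos + j + 1) % M == 0 && pos + j < 0) = [] := by
    apply List.filter_eq_nil_iff.mpr
    intro j _
    simp
  rw [this]
  simp

-- shifting the offset by one full box width
theorem selSum_shift (M full pos : Nat) (hMfull : M ≤ full) (s : List Int) :
    selSum M full (pos + M) s = selSum M (full - M) pos s := by
  unfold selSum
  have hpred : (fun j => (pos + M + j + 1) % M == 0 && decide (pos + M + j < full))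
      = (fun j => (pos + j + 1) % M == 0 && decide (pos + j < full - M)) := by
    funext j
    have h1 : (pos + M + j + 1) % M = (pos + j + 1) % M := by
      have : pos + M + j + 1 = M + (pos + j + 1) := by omega
      rw [this, Nat.add_mod_left]
    rw [h1]
    have h2 : decide (pos + M + j < full) = decide (pos + j < full - M) := by
      apply decide_eq_decide.mpr; omega
    rw [h2]
  rw [hpred]

-- the first whole box of a descending list contributes exactly its last element
theorem selSum_first_chunk (M full : Nat) (hM : 1 ≤ M) (hfull : M ≤ full) (a : List Int)
    (hlen : a.length = M) : selSum M full 0 a = a.getD (M - 1) 0 := by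
  obtain ⟨K, rfl⟩ : ∃ K, M = K + 1 := ⟨M - 1, by omega⟩
  unfold selSum
  rw [hlen, List.range_succ, List.filter_append]
  have h1 : (List.range K).filter (fun j => (0 + j + 1) % (K + 1) == 0 && 0 + j < full) = [] := by
    apply List.filter_eq_nil_iff.mpr
    intro j hj
    have hj' : j < K := List.mem_range.mp hj
    have hmod : (j + 1) % (K + 1) = j + 1 := Nat.mod_eq_of_lt (by omega)
    simp [hmod]
  have h2 : ([K].filter (fun j => (0 + j + 1) % (K + 1) == 0 && 0 + j < full)) = [K] := by
    have hc2 : K < full := by omega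
    simp [List.filter, hc2]
  rw [h1, h2]
  simp

-- a descending list splits into the run of its maximum followed by the rest
theorem desc_split (v : Int) : ∀ (s : List Int), s.Pairwise (fun a b => b ≤ a) →
    (∀ w ∈ s, w ≤ v) → s = List.replicate (s.count v) v ++ s.filter (· ≠ v) := by
  intro s
  induction s with
  | nil => intro _ _; simp
  | cons x t ih =>
    intro hp hle
    have hpt : t.Pairwise (fun a b => b ≤ a) := hp.of_cons
    have hxt : ∀ w ∈ t, w ≤ x := fun w hw => (List.pairwise_cons.mp hp).1 w hw
    by_cases hx : x = v
    · subst hx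
      have hlet : ∀ w ∈ t, w ≤ x := hxt
      rw [List.count_cons_self]
      have hfx : (x :: t).filter (· ≠ x) = t.filter (· ≠ x) := by
        simp [List.filter]
      rw [hfx, List.replicate_succ]
      simp only [List.cons_append, List.cons.injEq, true_and]
      exact ih hpt hlet
    · have hvx : x < v := lt_of_le_of_ne (hle x (List.mem_cons_self)) hx
      have hnv : v ∉ x :: t := by
        intro hv
        rcases List.mem_cons.mp hv with h | h
        · exact hx h.symm
        · exact absurd (lt_of_le_of_lt (hxt v h) hvx) (lt_irrefl v)
      rw [List.count_eq_zero_of_not_mem hnv, List.replicate_zero, List.nil_append]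
      rw [List.filter_eq_self.mpr]
      intro a ha
      simp only [ne_eq, decide_eq_true_eq]
      intro hav
      exact hnv (hav ▸ ha)

-- ===== A-side: the while loop as a chunked minimum sum, then selSum =====
def chunkMinSum (M : Nat) : Nat → List Int → Int
  | 0, _ => 0
  | f + 1, l =>
    if M ≤ l.length then
      ((PySem.List.min? (l.take M) (fun x => x)).getD 0) + chunkMinSum M f (l.drop M)
    else 0

theorem chunkMinSum_nil (M : Nat) (hM : 1 ≤ M) (f : Nat) : chunkMinSum M f [] = 0 := by
  cases f with
  | zero => rfl
  | succ f => simp [chunkMinSum]; omega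

theorem chunkMinSum_fuel (M : Nat) (hM : 1 ≤ M) :
    ∀ (f f' : Nat) (l : List Int), l.length ≤ f → l.length ≤ f' →
      chunkMinSum M f l = chunkMinSum M f' l := by
  intro f
  induction f with
  | zero =>
    intro f' l hf hf'
    have : l = [] := List.length_eq_zero_iff.mp (by omega)
    subst this
    simp [chunkMinSum_nil M hM]
  | succ f ih =>
    intro f' l hf hf'
    cases f' with
    | zero =>
      have : l = [] := List.length_eq_zero_iff.mp (by omega)
      subst this
      simp [chunkMinSum_nil M hM]
    | succ f' =>
      simp only [chunkMinSum]
      by_cases h : M ≤ l.length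
      · simp only [if_pos h]
        have := ih f' (l.drop M) (by simp; omega) (by simp; omega)
        rw [this]
      · simp [if_neg h]

theorem loopA_eq (M : Nat) (hM : 1 ≤ M) (t : List Int) :
    ∀ (f : Nat) (j : Nat) (ans : Int),
      solutionLoopA t (M : Int) f (j : Int) ans = ans + (M : Int) * chunkMinSum M f (t.drop j) := by
  intro f
  induction f with
  | zero => intro j ans; simp [solutionLoopA, chunkMinSum]
  | succ f ih =>
    intro j ans
    simp only [solutionLoopA, chunkMinSum]
    by_cases h : M ≤ (t.drop j).length
    · have hlen : j + M ≤ t.length := by simp at h; omega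
      have hcond : (j : Int) + (M : Int) ≤ (t.length : Int) := by exact_mod_cast hlen
      rw [if_pos hcond, if_pos h]
      have hslice : PySem.List.slice t (some (j : Int)) (some ((j : Int) + (M : Int)))
          = (t.drop j).take M := by
        rw [PySem.List.slice_toNat t (by omega) (by omega)]
        have h1 : ((j : Int)).toNat = j := Int.toNat_natCast j
        have h2 : ((j : Int) + (M : Int)).toNat = j + M := by omega
        rw [h1, h2]
        congr 1
        omega
      have hj : (j : Int) + (M : Int) = ((j + M : Nat) : Int) := by push_cast; ring
      rw [hslice, hj, ih (j + M)]
      have hdrop : t.drop (j + M) = (t.drop j).drop M := by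
        rw [List.drop_drop]
      rw [hdrop]
      ring
    · have hlen : ¬ (j + M ≤ t.length) := by simp at h; omega
      have hcond : ¬ ((j : Int) + (M : Int) ≤ (t.length : Int)) := by
        intro hc; exact hlen (by exact_mod_cast hc)
      rw [if_neg hcond, if_neg h]
      ring

-- the minimum of a descending chunk of length M is its element at index M-1
theorem min_desc_chunk (s : List Int) (M : Nat) (hM : 1 ≤ M) (hlen : M ≤ s.length)
    (hs : s.Pairwise (fun a b => b ≤ a)) :
    (PySem.List.min? (s.take M) (fun x => x)).getD 0 = s.getD (M - 1) 0 := by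
  have hne : s.take M ≠ [] := by
    have hlt : (s.take M).length = M := by rw [List.length_take]; omega
    intro h
    rw [h] at hlt
    simp at hlt
    omega
  obtain ⟨mn, hmn⟩ : ∃ mn, PySem.List.min? (s.take M) (fun x => x) = some mn := by
    cases hh : PySem.List.min? (s.take M) (fun x => x) with
    | none => exact absurd ((PySem.List.min?_eq_none_iff _ _).mp hh) hne
    | some mn => exact ⟨mn, rfl⟩
  rw [hmn]
  simp only [Option.getD_some]
  have hMlt : M - 1 < s.length := by omega
  have hgetD : s.getD (M - 1) 0 = s[M - 1] := by
    rw [List.getD_eq_getElem?_getD, List.getElem?_eq_getElem hMlt]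
    rfl
  rw [hgetD]
  have htakelen : (s.take M).length = M := by simp; omega
  have hlast_mem : s[M - 1] ∈ s.take M := by
    have : (s.take M)[M - 1]'(by omega) = s[M - 1] := List.getElem_take
    rw [← this]
    exact List.getElem_mem _
  have h1 : mn ≤ s[M - 1] := PySem.List.min?_isMin hmn _ hlast_mem
  have h2 : s[M - 1] ≤ mn := by
    have hmem := PySem.List.min?_mem hmn
    obtain ⟨i, hi, hieq⟩ := List.mem_iff_getElem.mp hmem
    rw [← hieq]
    have hi' : i < M := by omega
    have hgi : (s.take M)[i]'(by omega) = s[i]'(by omega) := List.getElem_take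
    rw [hgi]
    rcases Nat.lt_or_ge i (M - 1) with hlt | hge
    · exact List.pairwise_iff_getElem.mp hs i (M - 1) (by omega) hMlt hlt
    · have : i = M - 1 := by omega
      subst this; rfl
  omega

-- A's chunked minimum sum over the truncated descending list equals selSum at offset 0
theorem chunk_eq_sel (M : Nat) (hM : 1 ≤ M) :
    ∀ (f : Nat) (s : List Int), s.length ≤ f → s.Pairwise (fun a b => b ≤ a) →
      chunkMinSum M f (s.take (s.length - s.length % M))
        = selSum M (s.length - s.length % M) 0 s := by
  intro f
  induction f with
  | zero =>
    intro s hf _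
    have h0 : s = [] := List.length_eq_zero_iff.mp (by omega)
    subst h0
    simp [chunkMinSum, selSum]
  | succ f ih =>
    intro s hf hs
    by_cases hsmall : s.length < M
    · have hmod : s.length % M = s.length := Nat.mod_eq_of_lt hsmall
      rw [hmod]
      simp only [Nat.sub_self]
      rw [List.take_zero, chunkMinSum_nil M hM, selSum_full_zero]
    · have hsmall : M ≤ s.length := Nat.le_of_not_lt hsmall
      have hmlt : s.length % M < M := Nat.mod_lt s.length (by omega)
      have htlen : M ≤ s.length - s.length % M := by
        have hdm := Nat.div_add_mod s.length M
        have hq : 1 ≤ s.length / M := (Nat.one_le_div_iff (by omega)).mpr hsmall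
        have hmul : M * 1 ≤ M * (s.length / M) := Nat.mul_le_mul_left M hq
        omega
      set fullN := s.length - s.length % M with hfullN
      have hlentake : (s.take fullN).length = fullN := by
        rw [List.length_take]; omega
      rw [show chunkMinSum M (f + 1) (s.take fullN)
            = ((PySem.List.min? ((s.take fullN).take M) (fun x => x)).getD 0)
              + chunkMinSum M f ((s.take fullN).drop M) by
        simp only [chunkMinSum]
        rw [if_pos (by omega)]]
      have htt : (s.take fullN).take M = s.take M := by
        rw [List.take_take]; congr 1; omega
      have hmodeq : (s.length - M) % M = s.length % M := by
        conv_rhs => rw [show s.length = M + (s.length - M) by omega]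
        rw [Nat.add_mod_left]
      have hdl : (s.drop M).length = s.length - M := by simp
      have htd : (s.take fullN).drop M
          = (s.drop M).take ((s.drop M).length - (s.drop M).length % M) := by
        rw [List.drop_take]
        congr 1
        rw [hdl, hmodeq]
        omega
      rw [htt, htd]
      have hdpair : (s.drop M).Pairwise (fun a b => b ≤ a) := hs.sublist (List.drop_sublist M s)
      rw [ih (s.drop M) (by simp; omega) hdpair]
      rw [min_desc_chunk s M hM hsmall hs]
      conv_rhs => rw [show s = s.take M ++ s.drop M by rw [List.take_append_drop]]
      rw [selSum_append]
      have hlM : (s.take M).length = M := by rw [List.length_take]; omega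
      rw [hlM]
      have hshift := selSum_shift M fullN 0 htlen (s.drop M)
      rw [hshift]
      have hfirst := selSum_first_chunk M fullN hM htlen (s.take M) hlM
      rw [hfirst]
      have hgd : (s.take M).getD (M - 1) 0 = s.getD (M - 1) 0 := by
        rw [List.getD_eq_getElem?_getD, List.getD_eq_getElem?_getD,
            List.getElem?_take_of_lt (by omega)]
      rw [hgd]
      have hfn : (s.drop M).length - (s.drop M).length % M = fullN - M := by
        rw [hdl, hmodeq]; omega
      rw [hfn]

-- ===== B-side: the fold over descending distinct values equals selSum =====
theorem B_fold (M full : Nat) (c : Int → Int) :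
    ∀ (ks : List Int) (s : List Int) (pos : Nat) (t0 : Int),
      ks.Pairwise (· > ·) → s.Pairwise (fun a b => b ≤ a) →
      (∀ v, v ∈ ks ↔ v ∈ s) → (∀ v ∈ ks, c v = (s.count v : Int)) →
      (ks.foldl (fun (p : Int × Int) v =>
          (p.1 + c v,
           p.2 + (PySem.Int.floordiv (min (p.1 + c v) (full : Int)) (M : Int)
                  - PySem.Int.floordiv (min p.1 (full : Int)) (M : Int)) * v))
        ((pos : Int), t0)).2
      = t0 + selSum M full pos s := by
  intro ks
  induction ks with
  | nil =>
    intro s pos t0 _ _ hmem _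
    have hs : s = [] := by
      apply List.eq_nil_iff_forall_not_mem.mpr
      intro v hv
      exact absurd ((hmem v).mpr hv) List.not_mem_nil
    subst hs
    simp [selSum]
  | cons v ks ih =>
    intro s pos t0 hks hs hmem hcnt
    have hvgt : ∀ w ∈ ks, w < v := fun w hw => (List.pairwise_cons.mp hks).1 w hw
    have hmax : ∀ w ∈ s, w ≤ v := by
      intro w hw
      rcases List.mem_cons.mp ((hmem w).mpr hw) with h | h
      · exact le_of_eq h
      · exact le_of_lt (hvgt w h)
    have hsplit := desc_split v s hs hmax
    set cnt := s.count v with hcntdef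
    set s' := s.filter (· ≠ v) with hs'def
    have hcv : c v = (cnt : Int) := hcnt v List.mem_cons_self
    rw [List.foldl_cons]
    have hfd1 : PySem.Int.floordiv (min ((pos : Int) + c v) (full : Int)) (M : Int)
        = ((min (pos + cnt) full / M : Nat) : Int) := by
      rw [hcv]
      rw [show ((pos : Int) + (cnt : Int)) = ((pos + cnt : Nat) : Int) by push_cast; ring]
      rw [show (min ((pos + cnt : Nat) : Int) ((full : Nat) : Int)) = ((min (pos + cnt) full : Nat) : Int) by rw [Nat.cast_min]]
      exact PySem.Int.floordiv_natCast _ _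
    have hfd0 : PySem.Int.floordiv (min (pos : Int) (full : Int)) (M : Int)
        = ((min pos full / M : Nat) : Int) := by
      rw [show (min ((pos : Nat) : Int) ((full : Nat) : Int)) = ((min pos full : Nat) : Int) by rw [Nat.cast_min]]
      exact PySem.Int.floordiv_natCast _ _
    have hpos1 : (pos : Int) + c v = ((pos + cnt : Nat) : Int) := by
      rw [hcv]; push_cast; ring
    rw [hpos1]
    have hcount' : ∀ w ∈ ks, c w = (s'.count w : Int) := by
      intro w hw
      have hwv : w ≠ v := ne_of_lt (hvgt w hw)
      have h1 : s.count w = s'.count w := by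
        conv_lhs => rw [hsplit]
        simp [List.count_append, List.count_replicate]
        intro h
        exact absurd h.symm hwv
      rw [hcnt w (List.mem_cons_of_mem _ hw), h1]
    have hmem' : ∀ w, w ∈ ks ↔ w ∈ s' := by
      intro w
      constructor
      · intro hw
        have hwv : w ≠ v := ne_of_lt (hvgt w hw)
        have hws : w ∈ s := (hmem w).mp (List.mem_cons_of_mem _ hw)
        rw [hs'def, List.mem_filter]
        exact ⟨hws, by simp [hwv]⟩
      · intro hw
        rw [hs'def, List.mem_filter] at hw
        have hwv : w ≠ v := by
          have := hw.2; simpa using this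
        rcases List.mem_cons.mp ((hmem w).mpr hw.1) with h | h
        · exact absurd h hwv
        · exact h
    have hs'pair : s'.Pairwise (fun a b => b ≤ a) := hs.sublist List.filter_sublist
    rw [ih s' (pos + cnt) _ hks.of_cons hs'pair hmem' hcount']
    conv_rhs => rw [hsplit]
    rw [selSum_append, List.length_replicate, selSum_replicate]
    have hfd1' : PySem.Int.floordiv (min ((pos + cnt : Nat) : Int) (full : Int)) (M : Int)
        = ((min (pos + cnt) full / M : Nat) : Int) := hpos1 ▸ hfd1
    simp only [hfd1', hfd0]
    ring

-- ===== VERDICT (by name: the statement is the Claim_ definition above) =====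
theorem solution_spec : Claim_equal_solution := by
  intro k m score _ hpre
  unfold Spec_solution solution solution_alt
  simp only []
  set s := PySem.List.sorted score (fun x => x) true with hsdef
  have hs : s.Pairwise (fun a b => b ≤ a) := PySem.List.sorted_pairwise_rev score (fun x => x)
  have hm1 : 1 ≤ m := hpre
  set M : Nat := m.toNat with hMdef
  have hM : 1 ≤ M := by omega
  have hmM : m = (M : Int) := by omega
  set fullN := s.length - s.length % M with hfullNdef
  -- the cutoff as a natural number
  have hmod : PySem.Int.mod (s.length : Int) m = ((s.length % M : Nat) : Int) := by
    rw [hmM]; exact PySem.Int.mod_natCast _ _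
  have hb : (s.length : Int) - PySem.Int.mod (s.length : Int) m = ((fullN : Nat) : Int) := by
    rw [hmod, hfullNdef]
    have := Nat.mod_le s.length M
    push_cast
    omega
  -- A's side
  have hslice : PySem.List.slice s (some 0) (some ((s.length : Int) - PySem.Int.mod (s.length : Int) m))
      = s.take fullN := by
    rw [PySem.List.slice_zero_start, hb, PySem.List.slice_to s (by omega), Int.toNat_natCast]
  rw [hslice]
  set t := s.take fullN with htdef
  have hloop : solutionLoopA t m (t.length + 1) 0 0
      = (M : Int) * chunkMinSum M (t.length + 1) t := by
    rw [hmM]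
    have := loopA_eq M hM t (t.length + 1) 0 0
    simpa using this
  rw [hloop]
  have htlen : t.length ≤ s.length := by rw [htdef]; simp
  have hfuel : chunkMinSum M (t.length + 1) t = chunkMinSum M s.length t := by
    apply chunkMinSum_fuel M hM <;> omega
  rw [hfuel, htdef, chunk_eq_sel M hM s.length s (le_refl _) hs]
  -- B's side
  rw [PySem.Dict.foldl_insert_getD_add_one_eq_counter]
  have hkeys : (PySem.Dict.counter score).keys = PySem.Set.ofList score := PySem.Dict.keys_counter score
  have hslen : s.length = score.length := PySem.List.length_sorted score (fun x => x) true
  have hb2 : (score.length : Int) - PySem.Int.mod (score.length : Int) m = ((fullN : Nat) : Int) := by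
    rw [← hslen]; exact hb
  rw [hkeys, hb2, hmM]
  set ks := PySem.List.sorted (PySem.Set.ofList score) (fun x => x) true with hksdef
  have hksge : ks.Pairwise (fun a b => b ≤ a) :=
    PySem.List.sorted_pairwise_rev (PySem.Set.ofList score) (fun x => x)
  have hksnd : ks.Nodup :=
    (PySem.List.sorted_perm (PySem.Set.ofList score) (fun x => x) true).nodup_iff.mpr
      (PySem.Set.nodup_ofList score)
  have hksgt : ks.Pairwise (· > ·) := by
    have := hksge.and hksnd
    exact this.imp (fun h => lt_of_le_of_ne h.1 (Ne.symm h.2))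
  have hmem : ∀ v, v ∈ ks ↔ v ∈ s := by
    intro v
    rw [hksdef, hsdef, PySem.List.mem_sorted, PySem.List.mem_sorted, PySem.Set.mem_ofList]
  have hcnt : ∀ v ∈ ks, (PySem.Dict.counter score).getD v 0 = (s.count v : Int) := by
    intro v _
    rw [PySem.Dict.getD_counter]
    congr 1
    exact ((PySem.List.sorted_perm score (fun x => x) true).count_eq v).symm
  have hfold := B_fold M fullN (fun v => (PySem.Dict.counter score).getD v 0) ks s 0 0
    hksgt hs hmem hcnt
  rw [Nat.cast_zero] at hfold
  rw [hfold]
  ring
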